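-- pv_equiv track=rewrite | github.com/pypi-data/pypi-mirror-264 | packages/ost-photometry/ost_photometry-0.1.13-py3-none-any.whl/ost_photometry/utilities.py | indices_to_slices
-- ===== SOURCE A (Python) =====
-- def indices_to_slices(index_list):
--     """
--         Convert a list of indices to slices for an array
--
--         Parameters
--         ----------
--         index_list      : `list`
--             List of indices
--
--         Returns
--         -------
--         slices          : `list`
--             List of slices
--     """
--     index_iterator = iter(index_list)
--     start = next(index_iterator)
--     slices = []
--     for i, x in enumerate(index_iterator):
--         if x - index_list[i] != 1:
--             end = index_list[i]
--             if start == end: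
--                 slices.append([start])
--             else:
--                 slices.append([start, end])
--             start = x
--     if index_list[-1] == start:
--         slices.append([start])
--     else:
--         slices.append([start, index_list[-1]])
--
--     return slices
-- ===== SOURCE B (Python) =====
-- def indices_to_slices(index_list):
--     n = len(index_list)
--     if n == 0:
--         return []
--     bounds = [0] + [j for j in range(1, n) if index_list[j] - index_list[j - 1] != 1] + [n]
--     return [[index_list[s]] if e - s == 1 else [index_list[s], index_list[e - 1]]
--             for s, e in zip(bounds, bounds[1:])]
-- ===== Notes on version B (the rewrite author's own statement) =====
-- stated objective: alternative
-- what changed: B first computes the list of break positions (indices where the +1 chain is interrupted) with a comprehension, then builds each slice from consecutive pairs of bounds by direct indexing, replacing A's single-pass start/end state machine with an epilogue; on the empty list A raises StopIteration while B returns [].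
-- outside the precondition, e.g. on indices_to_slices([]): A raises StopIteration, B returns []
import Mathlib
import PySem

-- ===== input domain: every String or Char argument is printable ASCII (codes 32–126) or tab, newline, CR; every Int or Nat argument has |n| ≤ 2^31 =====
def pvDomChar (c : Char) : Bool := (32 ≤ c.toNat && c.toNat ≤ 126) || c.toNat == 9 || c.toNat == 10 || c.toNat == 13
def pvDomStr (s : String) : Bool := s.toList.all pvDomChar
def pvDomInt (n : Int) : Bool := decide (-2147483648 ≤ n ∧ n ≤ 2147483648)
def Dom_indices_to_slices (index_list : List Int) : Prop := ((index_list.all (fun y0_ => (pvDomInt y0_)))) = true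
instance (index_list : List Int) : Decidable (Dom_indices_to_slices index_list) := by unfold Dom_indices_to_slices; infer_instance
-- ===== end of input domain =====

-- B replaces A's single-pass start/end state machine by two stages: first the list of
-- break positions is computed with a comprehension, then each slice is built from
-- consecutive pairs of bounds by direct indexing (alternative decomposition, same O(n) cost).

-- ===== PORT A =====
def indices_to_slices (index_list : List Int) : List (List Int) :=
  match index_list with
  | [] => []   -- Python raises StopIteration here; excluded by Pre_
  | start0 :: rest =>
    -- for i, x in enumerate(index_iterator): … (iterator already past the first element)
    let st := (PySem.List.enumerate rest 0).foldl
      (fun (st : Int × List (List Int)) (p : Int × Int) =>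
        if p.2 - (PySem.List.pyGet? index_list p.1).getD 0 ≠ 1 then
          let e := (PySem.List.pyGet? index_list p.1).getD 0
          (p.2, st.2 ++ [if st.1 = e then [st.1] else [st.1, e]])
        else st) (start0, [])
    let last := (PySem.List.pyGet? index_list (-1)).getD 0
    st.2 ++ [if last = st.1 then [st.1] else [st.1, last]]

-- ===== PORT B =====
def indices_to_slices_alt (index_list : List Int) : List (List Int) :=
  let n : Int := index_list.length
  if n = 0 then []
  else
    -- bounds = [0] + [j for j in range(1, n) if index_list[j] - index_list[j-1] != 1] + [n]
    let bounds : List Int := [(0 : Int)] ++ ((PySem.List.pyRange 1 n 1).filter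
        (fun j => decide ((PySem.List.pyGet? index_list j).getD 0
                          - (PySem.List.pyGet? index_list (j - 1)).getD 0 ≠ 1))) ++ [n]
    -- zip(bounds, bounds[1:]); all indices are nonnegative, so bounds[1:] = drop 1 (exact)
    (bounds.zip (bounds.drop 1)).map (fun p =>
      if p.2 - p.1 = 1 then [(PySem.List.pyGet? index_list p.1).getD 0]
      else [(PySem.List.pyGet? index_list p.1).getD 0,
            (PySem.List.pyGet? index_list (p.2 - 1)).getD 0])

-- ===== PRECONDITION & SPEC =====
-- Pre_ excludes exactly the empty list, on which A raises StopIteration.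
def Pre_indices_to_slices (index_list : List Int) : Prop := index_list ≠ []
instance (index_list : List Int) : Decidable (Pre_indices_to_slices index_list) := by
  unfold Pre_indices_to_slices; infer_instance

def pvWitness_indices_to_slices : List Int := [1, 2, 3, 7, 9, 10]

def Spec_indices_to_slices (index_list : List Int) (out : List (List Int)) : Prop := out = indices_to_slices_alt index_list
instance (index_list : List Int) (out : List (List Int)) : Decidable (Spec_indices_to_slices index_list out) := by unfold Spec_indices_to_slices; infer_instance

-- ===== CLAIM (what is proved, stated in full; the proofs are below) =====
def Claim_equal_indices_to_slices : Prop := ∀ (index_list : List Int), Dom_indices_to_slices index_list → Pre_indices_to_slices index_list → Spec_indices_to_slices index_list (indices_to_slices index_list)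

-- ===== LEMMAS AND PROOFS =====

-- canonical run-peeling form both ports are proved equal to:
-- splitRun e l = (end of the +1 run continuing e, remainder of l)
def splitRun (run_end : Int) : List Int → Int × List Int
  | [] => (run_end, [])
  | x :: rest => if x - run_end = 1 then splitRun x rest else (run_end, x :: rest)

theorem splitRun_snd_length (e : Int) (l : List Int) : (splitRun e l).2.length ≤ l.length := by
  induction l generalizing e with
  | nil => simp [splitRun]
  | cons x rest ih =>
    simp only [splitRun]
    split
    · exact le_trans (ih x) (by simp)
    · simp

def altGo : List Int → List (List Int)
  | [] => []
  | first :: rest =>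
    let p := splitRun first rest
    (if first = p.1 then [first] else [first, p.1]) :: altGo p.2
termination_by l => l.length
decreasing_by
  simpa using Nat.lt_succ_of_le (splitRun_snd_length first rest)

-- ---- A-side: indices_to_slices = altGo (on nonempty lists) ----

-- A's fold body, rewritten to act on the pair (previous element, current element)
def gA (st : Int × List (List Int)) (q : Int × Int) : Int × List (List Int) :=
  if q.2 - q.1 ≠ 1 then
    (q.2, st.2 ++ [if st.1 = q.1 then [st.1] else [st.1, q.1]])
  else st

-- the lookback pyGet? over enumerate equals the fold over consecutive pairs
theorem foldA_eq (l : List Int) (rest : List Int) (m : Nat) (prev : Int)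
    (h : l.drop m = prev :: rest) (start : Int) (acc : List (List Int)) :
    (PySem.List.enumerate rest (m : Int)).foldl
      (fun (st : Int × List (List Int)) (p : Int × Int) =>
        if p.2 - (PySem.List.pyGet? l p.1).getD 0 ≠ 1 then
          (p.2, st.2 ++ [if st.1 = (PySem.List.pyGet? l p.1).getD 0 then [st.1]
                         else [st.1, (PySem.List.pyGet? l p.1).getD 0]])
        else st) (start, acc)
    = ((prev :: rest).zip rest).foldl gA (start, acc) := by
  induction rest generalizing m prev start acc with
  | nil => simp [PySem.List.enumerate_nil]
  | cons y r ih =>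
    have hm : l[m]? = some prev := by
      have h2 : (l.drop m)[0]? = l[m + 0]? := List.getElem?_drop
      rw [h] at h2
      simpa using h2.symm
    have h' : l.drop (m + 1) = y :: r := by
      have : l.drop (m + 1) = (l.drop m).drop 1 := by
        rw [List.drop_drop]
      simp [this, h]
    have hget : PySem.List.pyGet? l (m : Int) = some prev := by
      simp [PySem.List.pyGet?_natCast, hm]
    have hcast : ((m : Int) + 1) = ((m + 1 : Nat) : Int) := by push_cast; ring
    simp only [PySem.List.enumerate_cons, List.foldl_cons, hget, hcast, List.zip_cons_cons]
    rw [ih (m + 1) y h']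
    congr 1

-- the zipped fold (plus A's epilogue) equals the run-peeling recursion
theorem mainZip (rest : List Int) (prev start : Int) (acc : List (List Int)) :
    (let st := ((prev :: rest).zip rest).foldl gA (start, acc)
     st.2 ++ [if ((prev :: rest).getLast?.getD 0) = st.1 then [st.1]
              else [st.1, (prev :: rest).getLast?.getD 0]])
    = acc ++ ((if start = (splitRun prev rest).1 then [start]
               else [start, (splitRun prev rest).1]) :: altGo (splitRun prev rest).2) := by
  induction rest generalizing prev start acc with
  | nil =>
    simp only [List.zip_nil_right, List.foldl_nil, splitRun, altGo, List.getLast?_singleton,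
      Option.getD_some]
    by_cases hsp : start = prev
    · simp [hsp]
    · have hps : ¬ prev = start := fun h => hsp h.symm
      simp [hsp, hps]
  | cons y r ih =>
    simp only [List.zip_cons_cons, List.foldl_cons, List.getLast?_cons_cons]
    by_cases h1 : y - prev = 1
    · have hg : gA (start, acc) (prev, y) = (start, acc) := by simp [gA, h1]
      have hs : splitRun prev (y :: r) = splitRun y r := by simp [splitRun, h1]
      rw [hg, hs]
      exact ih y start acc
    · have hg : gA (start, acc) (prev, y)
          = (y, acc ++ [if start = prev then [start] else [start, prev]]) := by
        simp [gA, h1]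
      have hs : splitRun prev (y :: r) = (prev, y :: r) := by simp [splitRun, h1]
      rw [hg, hs]
      rw [ih y y (acc ++ [if start = prev then [start] else [start, prev]])]
      simp [altGo]

-- ---- B-side: indices_to_slices_alt = altGo (on nonempty lists) ----

-- internal break positions of prev :: l, with prev at position k - 1
def brkAux (prev : Int) (l : List Int) (k : Nat) : List Nat :=
  match l with
  | [] => []
  | x :: rest => (if x - prev ≠ 1 then [k] else []) ++ brkAux x rest (k + 1)

-- the port's filtered pyRange is brkAux, cast to Int
theorem filt_eq (l : List Int) (sub : List Int) (k : Nat) (prev : Int)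
    (hk : 1 ≤ k) (h : l.drop (k - 1) = prev :: sub) :
    (PySem.List.pyRange (k : Int) (l.length : Int) 1).filter
      (fun j => decide ((PySem.List.pyGet? l j).getD 0
                        - (PySem.List.pyGet? l (j - 1)).getD 0 ≠ 1))
    = List.map (fun m : Nat => (m : Int)) (brkAux prev sub k) := by
  induction sub generalizing k prev with
  | nil =>
    have hlen : l.length = k := by
      have hc := congrArg List.length h
      simp only [List.length_drop, List.length_cons, List.length_nil] at hc
      have hd : k - 1 < l.length := by omega
      omega
    rw [hlen, PySem.List.pyRange_one_eq_nil (le_refl _)]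
    simp [brkAux]
  | cons y r ih =>
    have hc := congrArg List.length h
    simp only [List.length_drop, List.length_cons] at hc
    have hlen : l.length = k + 1 + r.length := by
      have hd : k - 1 ≤ l.length := by omega
      omega
    have hprev : l[k - 1]? = some prev := by
      have h2 : (l.drop (k - 1))[0]? = l[(k - 1) + 0]? := List.getElem?_drop
      rw [h] at h2
      simpa using h2.symm
    have hy : l[k]? = some y := by
      have h2 : (l.drop (k - 1))[1]? = l[(k - 1) + 1]? := List.getElem?_drop
      rw [h] at h2
      have hk1 : k - 1 + 1 = k := by omega
      rw [hk1] at h2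
      simpa using h2.symm
    have hky : PySem.List.pyGet? l (k : Int) = some y := by
      simp [PySem.List.pyGet?_natCast, hy]
    have hkm : PySem.List.pyGet? l ((k : Int) - 1) = some prev := by
      have hcast : ((k : Int) - 1) = ((k - 1 : Nat) : Int) := by
        rw [Nat.cast_sub hk]; simp
      rw [hcast]
      simp [PySem.List.pyGet?_natCast, hprev]
    have hlt : (k : Int) < (l.length : Int) := by
      rw [hlen]; push_cast; omega
    rw [PySem.List.pyRange_one_cons hlt, List.filter_cons]
    have hdrop : l.drop (k + 1 - 1) = y :: r := by
      have h1 : l.drop k = (l.drop (k - 1)).drop 1 := by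
        rw [List.drop_drop]
        congr 1
        omega
      simp only [Nat.add_sub_cancel, h1, h, List.drop_succ_cons, List.drop_zero]
    have hcast1 : ((k : Int) + 1) = ((k + 1 : Nat) : Int) := by push_cast; ring
    rw [hcast1, ih (k + 1) y (by omega) hdrop]
    simp only [hky, hkm, Option.getD_some, brkAux, List.map_append]
    by_cases hne : y - prev ≠ 1
    · simp [hne]
    · simp [hne]

-- brkAux splits at the end of the first run
theorem brk_split (rest : List Int) (prev : Int) (k : Nat) :
    brkAux prev rest k =
      match (splitRun prev rest).2 with
      | [] => []
      | y :: r2 => (k + (rest.length - (splitRun prev rest).2.length))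
                    :: brkAux y r2 (k + (rest.length - (splitRun prev rest).2.length) + 1) := by
  induction rest generalizing prev k with
  | nil => simp [splitRun, brkAux]
  | cons x r ih =>
    by_cases h : x - prev = 1
    · have hs : splitRun prev (x :: r) = splitRun x r := by simp [splitRun, h]
      have hb : brkAux prev (x :: r) k = brkAux x r (k + 1) := by simp [brkAux, h]
      rw [hb, hs, ih x (k + 1)]
      have hle := splitRun_snd_length x r
      rcases hsp : (splitRun x r).2 with _ | ⟨y, r2⟩
      · simp
      · rw [hsp] at hle
        simp only [List.length_cons] at hle
        simp only [List.length_cons]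
        have h1 : k + 1 + (r.length - (r2.length + 1))
            = k + (r.length + 1 - (r2.length + 1)) := by omega
        rw [h1]
    · have hs : splitRun prev (x :: r) = (prev, x :: r) := by simp [splitRun, h]
      have hb : brkAux prev (x :: r) k = k :: brkAux x r (k + 1) := by simp [brkAux, h]
      rw [hb, hs]
      simp

-- the end of the run is prev + (number of consumed elements)
theorem splitRun_end (rest : List Int) (prev : Int) :
    (splitRun prev rest).1 = prev + ((rest.length - (splitRun prev rest).2.length : Nat) : Int) := by
  induction rest generalizing prev with
  | nil => simp [splitRun]
  | cons x r ih =>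
    simp only [splitRun]
    by_cases h : x - prev = 1
    · simp only [h, if_true]
      have hle := splitRun_snd_length x r
      rw [ih x]
      have hx : x = prev + 1 := by omega
      rw [Nat.cast_sub hle, Nat.cast_sub (by simp only [List.length_cons]; omega : (splitRun x r).2.length ≤ (x :: r).length)]
      simp only [List.length_cons]
      push_cast
      omega
    · simp [h]

-- the end of the run sits at position (consumed count) in prev :: rest
theorem splitRun_getElem (rest : List Int) (prev : Int) :
    (prev :: rest)[rest.length - (splitRun prev rest).2.length]? = some (splitRun prev rest).1 := by
  induction rest generalizing prev with
  | nil => simp [splitRun]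
  | cons x r ih =>
    simp only [splitRun]
    by_cases h : x - prev = 1
    · simp only [h, if_true]
      have hle := splitRun_snd_length x r
      have hidx : (x :: r).length - (splitRun x r).2.length
          = (r.length - (splitRun x r).2.length) + 1 := by
        simp only [List.length_cons]; omega
      rw [hidx]
      simpa using ih x
    · simp [h]

-- the remainder is the corresponding suffix
theorem splitRun_drop (rest : List Int) (prev : Int) :
    (prev :: rest).drop (rest.length - (splitRun prev rest).2.length + 1) = (splitRun prev rest).2 := by
  induction rest generalizing prev with
  | nil => simp [splitRun]
  | cons x r ih =>
    simp only [splitRun]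
    by_cases h : x - prev = 1
    · simp only [h, if_true]
      have hle := splitRun_snd_length x r
      have hidx : (x :: r).length - (splitRun x r).2.length + 1
          = (r.length - (splitRun x r).2.length + 1) + 1 := by
        simp only [List.length_cons]; omega
      rw [hidx]
      simpa using ih x
    · simp [h]

-- the first bounds pair produces the first run's slice
theorem headF (l : List Int) (d : Nat) (x0 : Int) (rest : List Int)
    (h : l.drop d = x0 :: rest) :
    (if ((d + (rest.length - (splitRun x0 rest).2.length) + 1 : Nat) : Int) - (d : Int) = 1
     then [(PySem.List.pyGet? l (d : Int)).getD 0]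
     else [(PySem.List.pyGet? l (d : Int)).getD 0,
           (PySem.List.pyGet? l (((d + (rest.length - (splitRun x0 rest).2.length) + 1 : Nat) : Int) - 1)).getD 0])
    = (if x0 = (splitRun x0 rest).1 then [x0] else [x0, (splitRun x0 rest).1]) := by
  have hgd : PySem.List.pyGet? l (d : Int) = some x0 := by
    have h2 : (l.drop d)[0]? = l[d + 0]? := List.getElem?_drop
    rw [h] at h2
    simp only [List.getElem?_cons_zero, Nat.add_zero] at h2
    simp [PySem.List.pyGet?_natCast, h2.symm]
  have hge : PySem.List.pyGet? l
      (((d + (rest.length - (splitRun x0 rest).2.length) + 1 : Nat) : Int) - 1)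
      = some (splitRun x0 rest).1 := by
    have hc : (((d + (rest.length - (splitRun x0 rest).2.length) + 1 : Nat) : Int) - 1)
        = ((d + (rest.length - (splitRun x0 rest).2.length) : Nat) : Int) := by
      push_cast; ring
    have h2 : (l.drop d)[rest.length - (splitRun x0 rest).2.length]?
        = l[d + (rest.length - (splitRun x0 rest).2.length)]? := List.getElem?_drop
    rw [h, splitRun_getElem] at h2
    rw [hc, PySem.List.pyGet?_natCast]
    exact h2.symm
  have hend := splitRun_end rest x0
  by_cases hc0 : rest.length - (splitRun x0 rest).2.length = 0
  · have hone : (((d + (rest.length - (splitRun x0 rest).2.length) + 1 : Nat) : Int) - (d : Int)) = 1 := by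
      rw [hc0]; push_cast; ring
    have hx : x0 = (splitRun x0 rest).1 := by rw [hend, hc0]; simp
    rw [if_pos hone, if_pos hx, hgd]
    simp
  · have hone : ¬ ((((d + (rest.length - (splitRun x0 rest).2.length) + 1 : Nat) : Int) - (d : Int)) = 1) := by
      push_cast; omega
    have hx : ¬ (x0 = (splitRun x0 rest).1) := by
      rw [hend]
      intro hcontra
      have : ((rest.length - (splitRun x0 rest).2.length : Nat) : Int) = 0 := by omega
      omega
    rw [if_neg hone, if_neg hx, hgd, hge]
    simp

-- main B lemma (strong induction on the tail length): bounds-pairs map = altGo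
theorem mainB_aux (N : Nat) : ∀ (l : List Int) (d : Nat) (x0 : Int) (rest : List Int),
    rest.length ≤ N → l.drop d = x0 :: rest →
    ((((d : Int) :: (List.map (fun m : Nat => (m : Int)) (brkAux x0 rest (d + 1)) ++ [(l.length : Int)])).zip (((d : Int) :: (List.map (fun m : Nat => (m : Int)) (brkAux x0 rest (d + 1)) ++ [(l.length : Int)])).drop 1)).map (fun p =>
       if p.2 - p.1 = 1 then [(PySem.List.pyGet? l p.1).getD 0]
       else [(PySem.List.pyGet? l p.1).getD 0,
             (PySem.List.pyGet? l (p.2 - 1)).getD 0]))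
    = altGo (x0 :: rest) := by
  induction N with
  | zero =>
    intro l d x0 rest hN h
    have hr : rest = [] := List.eq_nil_of_length_eq_zero (Nat.le_zero.mp hN)
    subst hr
    have hlen : l.length = d + 1 := by
      have hc := congrArg List.length h
      simp only [List.length_drop, List.length_cons, List.length_nil] at hc
      have hd : d < l.length := by omega
      omega
    have hn : (l.length : Int) = ((d + (([] : List Int).length - (splitRun x0 []).2.length) + 1 : Nat) : Int) := by
      rw [hlen]; simp [splitRun]
    have hbn : brkAux x0 [] (d + 1) = [] := rfl
    simp only [hbn, List.map_nil, List.nil_append, hn]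
    show List.map _ (((d : Int) :: [((d + (([] : List Int).length - (splitRun x0 []).2.length) + 1 : Nat) : Int)]).zip (List.drop 1 ((d : Int) :: [((d + (([] : List Int).length - (splitRun x0 []).2.length) + 1 : Nat) : Int)]))) = _
    simp only [List.drop_succ_cons, List.drop_zero]
    rw [List.zip_cons_cons, List.zip_nil_right]
    simp only [List.map_cons, List.map_nil]
    rw [headF l d x0 [] h]
    simp [altGo, splitRun]
  | succ N ih =>
    intro l d x0 rest hN h
    have hlen : l.length = d + 1 + rest.length := by
      have hc := congrArg List.length h
      simp only [List.length_drop, List.length_cons] at hc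
      have hd : d ≤ l.length := by omega
      omega
    rw [brk_split]
    rcases hsp : (splitRun x0 rest).2 with _ | ⟨y, r2⟩
    · -- the whole tail is one run
      have hc : rest.length - (splitRun x0 rest).2.length = rest.length := by rw [hsp]; simp
      have hn : (l.length : Int)
          = ((d + (rest.length - (splitRun x0 rest).2.length) + 1 : Nat) : Int) := by
        rw [hlen, hc]; push_cast; ring
      simp only [hsp, List.map_nil, List.nil_append, hn]
      simp only [List.drop_succ_cons, List.drop_zero]
      rw [List.zip_cons_cons, List.zip_nil_right]
      simp only [List.map_cons, List.map_nil]
      have hh := headF l d x0 rest h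
      simp only [hsp] at hh
      rw [hh, altGo]
      simp only [hsp, altGo]
    · -- a break after the first run
      have hle := splitRun_snd_length x0 rest
      rw [hsp] at hle
      simp only [List.length_cons] at hle
      have hb' : d + 1 + (rest.length - (splitRun x0 rest).2.length)
          = d + (rest.length - (splitRun x0 rest).2.length) + 1 := by omega
      have hdrop : l.drop (d + (rest.length - (splitRun x0 rest).2.length) + 1) = y :: r2 := by
        have h1 : l.drop (d + (rest.length - (splitRun x0 rest).2.length) + 1)
            = (l.drop d).drop (rest.length - (splitRun x0 rest).2.length + 1) := by
          rw [List.drop_drop]; congr 1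
        rw [h1, h, splitRun_drop, hsp]
      have hN2 : r2.length ≤ N := by omega
      have htail := ih l (d + (rest.length - (splitRun x0 rest).2.length) + 1) y r2 hN2 hdrop
      simp only [hsp] at hb' ⊢
      rw [hb']
      simp only [List.map_cons, List.cons_append, List.zip_cons_cons, List.drop_succ_cons,
        List.drop_zero, List.map_cons]
      have hh := headF l d x0 rest h
      simp only [hsp] at hh
      rw [hh]
      simp only [hsp, List.drop_succ_cons, List.drop_zero] at htail
      rw [htail]
      conv_rhs => rw [altGo]
      simp only [hsp]

-- main B lemma: the bounds-pairs map over a suffix equals altGo of that suffix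
theorem mainB (l : List Int) (d : Nat) (x0 : Int) (rest : List Int)
    (h : l.drop d = x0 :: rest) :
    ((((d : Int) :: (List.map (fun m : Nat => (m : Int)) (brkAux x0 rest (d + 1)) ++ [(l.length : Int)])).zip (((d : Int) :: (List.map (fun m : Nat => (m : Int)) (brkAux x0 rest (d + 1)) ++ [(l.length : Int)])).drop 1)).map (fun p =>
       if p.2 - p.1 = 1 then [(PySem.List.pyGet? l p.1).getD 0]
       else [(PySem.List.pyGet? l p.1).getD 0,
             (PySem.List.pyGet? l (p.2 - 1)).getD 0]))
    = altGo (x0 :: rest) := mainB_aux rest.length l d x0 rest (le_refl _) h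

-- ===== VERDICT (by name: the statement is the Claim_ definition above) =====
theorem indices_to_slices_spec : Claim_equal_indices_to_slices := by
  intro l _ hpre
  unfold Spec_indices_to_slices
  match l with
  | [] => exact absurd rfl hpre
  | x :: rest =>
    have hA : indices_to_slices (x :: rest) = altGo (x :: rest) := by
      unfold indices_to_slices
      have h0 : ((x :: rest) : List Int).drop 0 = x :: rest := rfl
      have hfold := foldA_eq (x :: rest) rest 0 x h0 x []
      have hlast : PySem.List.pyGet? (x :: rest) (-1) = (x :: rest).getLast? :=
        PySem.List.pyGet?_neg_one _
      simp only [Nat.cast_zero] at hfold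
      simp only [hfold, hlast]
      have hz := mainZip rest x x []
      simp only [List.nil_append] at hz
      simp only [hz]
      simp [altGo]
    have hB : indices_to_slices_alt (x :: rest) = altGo (x :: rest) := by
      unfold indices_to_slices_alt
      simp only []
      have hf := filt_eq (x :: rest) rest 1 x (le_refl 1) (by simp)
      simp only [Nat.cast_one] at hf
      rw [hf]
      have hm := mainB (x :: rest) 0 x rest rfl
      simpa using hm
    rw [hA, hB]
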